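-- pv_equiv track=rewrite | github.com/pypi-data/pypi-mirror-83 | packages/biseau/biseau-0.0.20.tar.gz/biseau-0.0.20/biseau/utils.py | color_from_colors
-- ===== SOURCE A (Python) =====
-- HANDLED_COLORS = {'red', 'green', 'blue'}
--
-- def color_from_colors(colors:set) -> str:
--     """Return one color that represents the given ones"""
--     if all(color in HANDLED_COLORS for color in colors):
--         if len(colors) == 1: return next(iter(colors))
--         if len(colors) == 2:
--             if 'red' in colors:
--                 if 'blue' in colors: return 'magenta'
--                 else: return 'yellow'  # red and green
--             else: return 'cyan'  # blue and green
--         if len(colors) == 3: return 'white'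
--     elif len(colors) == 1:  # special case where only one non handled color is given
--         return next(iter(colors))
--     raise ValueError('UNVALID COLORS: ' + ', '.join(colors))
-- ===== SOURCE B (Python) =====
-- HANDLED_COLORS = {'red', 'green', 'blue'}
--
-- _TABLE = {
--     frozenset({'red'}): 'red',
--     frozenset({'green'}): 'green',
--     frozenset({'blue'}): 'blue',
--     frozenset({'red', 'blue'}): 'magenta',
--     frozenset({'red', 'green'}): 'yellow',
--     frozenset({'blue', 'green'}): 'cyan',
--     frozenset({'red', 'green', 'blue'}): 'white',
-- }
--
-- def color_from_colors(colors: set) -> str: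
--     """Return one color that represents the given ones"""
--     key = frozenset(colors)
--     if key in _TABLE:
--         return _TABLE[key]
--     if len(colors) == 1:
--         return next(iter(colors))
--     raise ValueError('UNVALID COLORS: ' + ', '.join(colors))
-- ===== Notes on version B (the rewrite author's own statement) =====
-- stated objective: simpler
-- what changed: Replaces the nested length/membership branching by a single precomputed table keyed by the frozenset of colors, with one fallback for a single unhandled color.
import Mathlib
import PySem

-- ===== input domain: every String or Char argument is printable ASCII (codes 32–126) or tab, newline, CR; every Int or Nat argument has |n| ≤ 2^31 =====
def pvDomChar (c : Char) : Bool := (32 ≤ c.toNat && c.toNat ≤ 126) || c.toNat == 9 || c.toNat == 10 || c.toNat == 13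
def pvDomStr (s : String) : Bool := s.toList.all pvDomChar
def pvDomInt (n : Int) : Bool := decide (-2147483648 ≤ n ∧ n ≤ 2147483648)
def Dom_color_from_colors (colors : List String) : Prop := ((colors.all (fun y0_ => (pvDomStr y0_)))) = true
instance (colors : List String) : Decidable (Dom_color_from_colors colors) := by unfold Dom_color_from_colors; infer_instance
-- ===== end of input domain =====

-- B replaces A's nested length/membership branching by one precomputed table keyed by the
-- set of colors (simpler); both raise ValueError outside Pre_, modelled as "".

-- ===== PORT A =====
def color_from_colors (colors : List String) : String :=
  if colors.all (fun c => ["red", "green", "blue"].contains c) then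
    if colors.length = 1 then colors.headD ""
    else if colors.length = 2 then
      if colors.contains "red" then
        if colors.contains "blue" then "magenta" else "yellow"
      else "cyan"
    else if colors.length = 3 then "white"
    else ""  -- raise ValueError (excluded by Pre_)
  else if colors.length = 1 then colors.headD ""
  else ""  -- raise ValueError (excluded by Pre_)

-- ===== PORT B =====
-- frozenset equality on the List-String encoding of sets
def cfcSetEq (a b : List String) : Bool :=
  a.all (fun x => b.contains x) && b.all (fun x => a.contains x)

def cfcTable : List (List String × String) :=
  [(["red"], "red"), (["green"], "green"), (["blue"], "blue"),
   (["red", "blue"], "magenta"), (["red", "green"], "yellow"),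
   (["blue", "green"], "cyan"), (["red", "green", "blue"], "white")]

def color_from_colors_alt (colors : List String) : String :=
  match cfcTable.find? (fun kv => cfcSetEq kv.1 colors) with
  | some kv => kv.2
  | none =>
    if colors.length = 1 then colors.headD ""
    else ""  -- raise ValueError (excluded by Pre_)

-- ===== PRECONDITION & SPEC =====
-- Pre_ = exactly the set inputs on which A returns: the Nodup conjunct is the set-encoding
-- invariant (the argument is a Python set), and A raises ValueError on everything else.
def Pre_color_from_colors (colors : List String) : Prop :=
  colors.Nodup ∧
    (colors.length = 1 ∨
      ((colors.length = 2 ∨ colors.length = 3) ∧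
        ∀ c ∈ colors, c = "red" ∨ c = "green" ∨ c = "blue"))

instance (colors : List String) : Decidable (Pre_color_from_colors colors) := by
  unfold Pre_color_from_colors; infer_instance

def pvWitness_color_from_colors : List String := ["red", "blue"]

def Spec_color_from_colors (colors : List String) (out : String) : Prop := out = color_from_colors_alt colors
instance (colors : List String) (out : String) : Decidable (Spec_color_from_colors colors out) := by unfold Spec_color_from_colors; infer_instance

-- ===== CLAIM (what is proved, stated in full; the proofs are below) =====
def Claim_equal_color_from_colors : Prop := ∀ (colors : List String), Dom_color_from_colors colors → Pre_color_from_colors colors → Spec_color_from_colors colors (color_from_colors colors)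

-- ===== LEMMAS AND PROOFS =====

theorem cfc_singleton (x : String) :
    color_from_colors [x] = color_from_colors_alt [x] := by
  by_cases h1 : x = "red"
  · subst h1; decide
  by_cases h2 : x = "green"
  · subst h2; decide
  by_cases h3 : x = "blue"
  · subst h3; decide
  simp [color_from_colors, color_from_colors_alt, cfcTable, cfcSetEq, List.find?,
    h1, h2, h3]

-- ===== VERDICT (by name: the statement is the Claim_ definition above) =====
theorem color_from_colors_spec : Claim_equal_color_from_colors := by
  intro colors _ hpre
  obtain ⟨hnd, hcase⟩ := hpre
  show color_from_colors colors = color_from_colors_alt colors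
  rcases hcase with hlen | ⟨hlen, hmem⟩
  · obtain ⟨x, rfl⟩ := List.length_eq_one_iff.mp hlen
    exact cfc_singleton x
  · rcases hlen with h2 | h3
    · match colors, h2 with
      | [a, b], _ =>
        rcases hmem a (by simp) with rfl | rfl | rfl <;>
          rcases hmem b (by simp) with rfl | rfl | rfl <;>
            simp_all <;> decide
    · match colors, h3 with
      | [a, b, c], _ =>
        rcases hmem a (by simp) with rfl | rfl | rfl <;>
          rcases hmem b (by simp) with rfl | rfl | rfl <;>
            rcases hmem c (by simp) with rfl | rfl | rfl <;>
              simp_all <;> decide
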